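-- pv_equiv track=rewrite | github.com/onrmdc/pergen | backend/runners/interface_recovery.py | _find_interface_status_row
-- ===== SOURCE A (Python) =====
-- from typing import Any
--
-- def _find_interface_status_row(rows: list[dict[str, Any]], want: str) -> dict[str, Any] | None:
--     wl = want.strip().lower()
--     if not wl:
--         return None
--     for row in rows:
--         iface = str(row.get("interface") or "").strip()
--         if iface.lower() == wl:
--             return row
--     for row in rows:
--         iface = str(row.get("interface") or "").strip()
--         il = iface.lower()
--         if wl in il or il in wl:
--             return row
--     return None
-- ===== SOURCE B (Python) =====
-- def _find_interface_status_row(rows, want):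
--     wl = want.strip().lower()
--     if not wl:
--         return None
--     candidate = None
--     for row in rows:
--         il = str(row.get("interface") or "").strip().lower()
--         if il == wl:
--             return row
--         if candidate is None and (wl in il or il in wl):
--             candidate = row
--     return candidate
-- ===== Notes on version B (the rewrite author's own statement) =====
-- stated objective: simpler
-- what changed: Replaces A's two sequential passes over rows (exact pass, then substring pass) with one single pass that returns immediately on an exact match and remembers the first substring match as a candidate returned at the end.
import Mathlib
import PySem

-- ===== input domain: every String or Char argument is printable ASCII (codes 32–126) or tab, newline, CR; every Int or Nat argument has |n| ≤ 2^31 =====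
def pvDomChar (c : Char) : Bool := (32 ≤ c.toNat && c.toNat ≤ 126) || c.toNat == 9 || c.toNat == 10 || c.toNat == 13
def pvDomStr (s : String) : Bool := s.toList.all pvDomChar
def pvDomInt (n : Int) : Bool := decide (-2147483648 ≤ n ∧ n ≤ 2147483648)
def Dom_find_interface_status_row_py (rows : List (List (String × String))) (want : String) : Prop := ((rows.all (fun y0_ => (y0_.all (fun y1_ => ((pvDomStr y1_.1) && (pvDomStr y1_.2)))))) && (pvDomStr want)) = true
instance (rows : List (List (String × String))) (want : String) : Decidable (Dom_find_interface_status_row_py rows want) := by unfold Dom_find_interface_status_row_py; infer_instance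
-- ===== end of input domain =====

-- B is the same search in ONE pass (return exact match immediately, remember the first
-- substring match as a candidate) instead of A's two sequential passes; objective: simpler.

-- ===== PORT A =====
-- iface = str(row.get("interface") or "").strip()  (values are strings; `or ""` = default "")
def pvIface (row : List (String × String)) : String :=
  PySem.Str.strip (PySem.Dict.getD (PySem.Dict.mk row) "interface" "")

-- wl in il or il in wl
def pvFuzzy (il wl : String) : Bool := PySem.Str.isIn wl il || PySem.Str.isIn il wl

-- first pass: exact match on iface.lower()
def pvLoop1 (rows : List (List (String × String))) (wl : String) : Option (List (String × String)) :=
  match rows with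
  | [] => none
  | row :: rest => if PySem.Str.lower (pvIface row) = wl then some row else pvLoop1 rest wl

-- second pass: substring match either way
def pvLoop2 (rows : List (List (String × String))) (wl : String) : Option (List (String × String)) :=
  match rows with
  | [] => none
  | row :: rest => if pvFuzzy (PySem.Str.lower (pvIface row)) wl then some row else pvLoop2 rest wl

def find_interface_status_row_py (rows : List (List (String × String))) (want : String) : Option (List (String × String)) :=
  let wl := PySem.Str.lower (PySem.Str.strip want)
  if wl = "" then none
  else
    match pvLoop1 rows wl with
    | some r => some r
    | none => pvLoop2 rows wl

-- ===== PORT B =====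
-- single loop carrying the first-substring-match candidate
def pvAltLoop (rows : List (List (String × String))) (wl : String)
    (cand : Option (List (String × String))) : Option (List (String × String)) :=
  match rows with
  | [] => cand
  | row :: rest =>
    let il := PySem.Str.lower (pvIface row)
    if il = wl then some row
    else if cand.isNone && pvFuzzy il wl then pvAltLoop rest wl (some row)
    else pvAltLoop rest wl cand

def find_interface_status_row_py_alt (rows : List (List (String × String))) (want : String) : Option (List (String × String)) :=
  let wl := PySem.Str.lower (PySem.Str.strip want)
  if wl = "" then none
  else pvAltLoop rows wl none

-- ===== PRECONDITION & SPEC =====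
def Spec_find_interface_status_row_py (rows : List (List (String × String))) (want : String) (out : Option (List (String × String))) : Prop := out = find_interface_status_row_py_alt rows want
instance (rows : List (List (String × String))) (want : String) (out : Option (List (String × String))) : Decidable (Spec_find_interface_status_row_py rows want out) := by unfold Spec_find_interface_status_row_py; infer_instance

-- ===== CLAIM (what is proved, stated in full; the proofs are below) =====
def Claim_equal_find_interface_status_row_py : Prop := ∀ (rows : List (List (String × String))) (want : String), Dom_find_interface_status_row_py rows want → Spec_find_interface_status_row_py rows want (find_interface_status_row_py rows want)

-- ===== LEMMAS AND PROOFS =====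

-- once a candidate is held, the single pass only looks for an exact match
theorem pvAltLoop_some (rows : List (List (String × String))) (wl : String) (c : List (String × String)) :
    pvAltLoop rows wl (some c) =
      match pvLoop1 rows wl with
      | some r => some r
      | none => some c := by
  induction rows with
  | nil => rfl
  | cons row rest ih =>
    simp only [pvAltLoop, pvLoop1, Option.isNone_some, Bool.false_and, Bool.false_eq_true,
      if_false]
    by_cases h : PySem.Str.lower (pvIface row) = wl
    · simp [h]
    · simp [h, ih]

-- the single pass starting with no candidate equals A's two passes
theorem pvAltLoop_none (rows : List (List (String × String))) (wl : String) :
    pvAltLoop rows wl none =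
      match pvLoop1 rows wl with
      | some r => some r
      | none => pvLoop2 rows wl := by
  induction rows with
  | nil => rfl
  | cons row rest ih =>
    simp only [pvAltLoop, pvLoop1, pvLoop2, Option.isNone_none, Bool.true_and]
    by_cases h1 : PySem.Str.lower (pvIface row) = wl
    · simp [h1]
    · by_cases h2 : pvFuzzy (PySem.Str.lower (pvIface row)) wl
      · simp only [if_neg h1, h2, if_true]
        rw [pvAltLoop_some]
      · simp only [if_neg h1, h2, Bool.false_eq_true, if_false]
        exact ih

-- ===== VERDICT (by name: the statement is the Claim_ definition above) =====
theorem find_interface_status_row_py_spec : Claim_equal_find_interface_status_row_py := by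
  intro rows want _
  unfold Spec_find_interface_status_row_py find_interface_status_row_py find_interface_status_row_py_alt
  by_cases h : PySem.Str.lower (PySem.Str.strip want) = ""
  · simp [h]
  · simp only [if_neg h]
    rw [pvAltLoop_none]
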